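-- pv_equiv track=rewrite | github.com/BramAlkema/svg2ooxml | src/svg2ooxml/services/mask_service.py | _detect_raster_features
-- ===== SOURCE A (Python) =====
-- from collections.abc import Iterable, Mapping, Sequence
--
-- def _detect_raster_features(fragments: Sequence[str]) -> set[str]:
--     features: set[str] = set()
--     for fragment in fragments:
--         if "<image" in fragment:
--             features.add("image")
--         if "<pattern" in fragment:
--             features.add("pattern")
--         if "<lineargradient" in fragment or "<radialgradient" in fragment:
--             features.add("gradient")
--         if "<filter" in fragment or "<fe" in fragment:
--             features.add("filter")
--         if "<foreignobject" in fragment: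
--             features.add("foreignObject")
--     return features
-- ===== SOURCE B (Python) =====
-- # Divide-and-conquer: split the fragment list in half, recurse on each half
-- # and unite the two feature sets; a feature->markers table drives the
-- # single-fragment base case (alternative decomposition; same result set).
-- _RASTER_MARKERS = [
--     ("image", ("<image",)),
--     ("pattern", ("<pattern",)),
--     ("gradient", ("<lineargradient", "<radialgradient")),
--     ("filter", ("<filter", "<fe")),
--     ("foreignObject", ("<foreignobject",)),
-- ]
--
--
-- def _detect_raster_features(fragments):
--     if len(fragments) == 0:
--         return set()
--     if len(fragments) == 1:
--         frag = fragments[0]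
--         return {name for name, markers in _RASTER_MARKERS
--                 if any(m in frag for m in markers)}
--     mid = len(fragments) // 2
--     return _detect_raster_features(fragments[:mid]) | _detect_raster_features(fragments[mid:])
-- ===== Notes on version B (the rewrite author's own statement) =====
-- stated objective: alternative
-- what changed: Replaces A's single left-to-right fold with five hard-coded if-branches by a divide-and-conquer recursion that splits the fragment list in half, recurses on each half and unites the two feature sets, with the per-fragment checks driven by a feature->markers table in the base case.
import Mathlib
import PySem

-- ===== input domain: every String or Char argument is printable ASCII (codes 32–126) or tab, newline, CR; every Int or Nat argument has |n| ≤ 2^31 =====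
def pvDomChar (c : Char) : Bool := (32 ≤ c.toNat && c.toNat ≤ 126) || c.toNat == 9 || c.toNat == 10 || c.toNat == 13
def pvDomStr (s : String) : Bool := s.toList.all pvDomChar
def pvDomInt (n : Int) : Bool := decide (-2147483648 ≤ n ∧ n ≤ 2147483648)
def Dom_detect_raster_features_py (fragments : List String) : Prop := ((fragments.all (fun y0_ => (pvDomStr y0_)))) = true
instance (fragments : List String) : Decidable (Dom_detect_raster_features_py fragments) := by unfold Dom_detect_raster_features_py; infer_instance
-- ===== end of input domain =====

-- B replaces A's single fold with five hard-coded if-branches by a divide-and-conquer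
-- recursion splitting the fragment list in half and uniting the two halves' feature
-- sets, with a feature→markers table driving the base case (alternative; same result).


-- ===== PORT A =====
def detect_raster_features_py (fragments : List String) : List String :=
  fragments.foldl (fun features fragment =>
    let features := if PySem.Str.isIn "<image" fragment then PySem.Set.add features "image" else features
    let features := if PySem.Str.isIn "<pattern" fragment then PySem.Set.add features "pattern" else features
    let features := if PySem.Str.isIn "<lineargradient" fragment || PySem.Str.isIn "<radialgradient" fragment then PySem.Set.add features "gradient" else features
    let features := if PySem.Str.isIn "<filter" fragment || PySem.Str.isIn "<fe" fragment then PySem.Set.add features "filter" else features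
    let features := if PySem.Str.isIn "<foreignobject" fragment then PySem.Set.add features "foreignObject" else features
    features) []

-- ===== PORT B =====
-- the _RASTER_MARKERS table of Source B
def pvRasterMarkers : List (String × List String) :=
  [("image", ["<image"]),
   ("pattern", ["<pattern"]),
   ("gradient", ["<lineargradient", "<radialgradient"]),
   ("filter", ["<filter", "<fe"]),
   ("foreignObject", ["<foreignobject"])]

-- the set comprehension over the table in Source B's single-fragment base case
def pvFeatOf (frag : String) : PySem.Set String :=
  pvRasterMarkers.foldl (fun s nm =>
    if nm.2.any (fun m => PySem.Str.isIn m frag) then PySem.Set.add s nm.1 else s) []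

def detect_raster_features_py_alt (fragments : List String) : List String :=
  if h0 : fragments.length = 0 then []
  else if h1 : fragments.length = 1 then
    match PySem.List.pyGet? fragments 0 with   -- fragments[0]; in range since length = 1
    | some frag => pvFeatOf frag
    | none => []
  else
    -- len(fragments) // 2: both operands nonnegative, so Nat division is exact here
    let mid : Nat := fragments.length / 2
    PySem.Set.union
      (detect_raster_features_py_alt (PySem.List.slice fragments none (some (mid : Int))))
      (detect_raster_features_py_alt (PySem.List.slice fragments (some (mid : Int)) none))
termination_by fragments.length
decreasing_by
  · rw [PySem.List.slice_to_natCast]; rw [List.length_take]; omega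
  · rw [PySem.List.slice_from_natCast]; rw [List.length_drop]; omega

-- ===== PRECONDITION & SPEC =====
def Spec_detect_raster_features_py (fragments : List String) (out : List String) : Prop := out = detect_raster_features_py_alt fragments
instance (fragments : List String) (out : List String) : Decidable (Spec_detect_raster_features_py fragments out) := by unfold Spec_detect_raster_features_py; infer_instance

-- ===== CLAIM =====
def Claim_equal_detect_raster_features_py : Prop := ∀ (fragments : List String), Dom_detect_raster_features_py fragments → Spec_detect_raster_features_py fragments (detect_raster_features_py fragments)

-- ===== LEMMAS AND PROOFS =====

-- A's per-fragment step, named for the proofs (definitionally the lambda in the port of A)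
def pvStepA (features : PySem.Set String) (fragment : String) : PySem.Set String :=
  let features := if PySem.Str.isIn "<image" fragment then PySem.Set.add features "image" else features
  let features := if PySem.Str.isIn "<pattern" fragment then PySem.Set.add features "pattern" else features
  let features := if PySem.Str.isIn "<lineargradient" fragment || PySem.Str.isIn "<radialgradient" fragment then PySem.Set.add features "gradient" else features
  let features := if PySem.Str.isIn "<filter" fragment || PySem.Str.isIn "<fe" fragment then PySem.Set.add features "filter" else features
  let features := if PySem.Str.isIn "<foreignobject" fragment then PySem.Set.add features "foreignObject" else features
  features

-- left-to-right specification of B's recursion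
def pvSpecB : List String → PySem.Set String
  | [] => []
  | f :: rest => PySem.Set.union (pvFeatOf f) (pvSpecB rest)

theorem pv_update_append (a b c : PySem.Set String) :
    PySem.Set.update a (b ++ c) = PySem.Set.update (PySem.Set.update a b) c := by
  simp [PySem.Set.update, List.foldl_append]

theorem pv_update_add (a b : PySem.Set String) (x : String) :
    PySem.Set.update a (PySem.Set.add b x) = PySem.Set.add (PySem.Set.update a b) x := by
  by_cases hx : x ∈ b
  · rw [PySem.Set.add_of_mem hx, PySem.Set.add_of_mem]
    exact (PySem.Set.mem_update _ _ _).mpr (Or.inr hx)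
  · rw [PySem.Set.add_of_not_mem hx, pv_update_append]
    rfl
theorem pv_update_assoc (a b c : PySem.Set String) :
    PySem.Set.update a (PySem.Set.update b c) = PySem.Set.update (PySem.Set.update a b) c := by
  induction c generalizing b with
  | nil => rfl
  | cons x cs ih =>
    show PySem.Set.update a (PySem.Set.update (PySem.Set.add b x) cs)
        = PySem.Set.update (PySem.Set.add (PySem.Set.update a b) x) cs
    rw [ih (PySem.Set.add b x), pv_update_add]

theorem pv_step_update (acc : PySem.Set String) (f : String) :
    pvStepA acc f = PySem.Set.update acc (pvFeatOf f) := by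
  simp only [pvStepA, pvFeatOf, pvRasterMarkers, List.foldl, List.any_cons, List.any_nil,
    Bool.or_false]
  cases h1 : PySem.Str.isIn "<image" f <;>
  cases h2 : PySem.Str.isIn "<pattern" f <;>
  cases h3 : (PySem.Str.isIn "<lineargradient" f || PySem.Str.isIn "<radialgradient" f) <;>
  cases h4 : (PySem.Str.isIn "<filter" f || PySem.Str.isIn "<fe" f) <;>
  cases h5 : PySem.Str.isIn "<foreignobject" f <;>
  simp [PySem.Set.update]

theorem pv_condAdd_nodup (s : PySem.Set String) (x : String) (c : Bool) (h : s.Nodup) :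
    (if c then PySem.Set.add s x else s).Nodup := by
  cases c
  · simpa using h
  · simpa using PySem.Set.nodup_add s x h

theorem pv_featOf_nodup (f : String) : (pvFeatOf f).Nodup := by
  simp only [pvFeatOf, pvRasterMarkers, List.foldl]
  apply pv_condAdd_nodup; apply pv_condAdd_nodup; apply pv_condAdd_nodup
  apply pv_condAdd_nodup; apply pv_condAdd_nodup
  exact List.nodup_nil

theorem pv_specB_nodup (l : List String) : (pvSpecB l).Nodup := by
  induction l with
  | nil => exact List.nodup_nil
  | cons f rest ih => exact PySem.Set.nodup_union _ _ (pv_featOf_nodup f)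

theorem pv_update_nil_left (b : PySem.Set String) (h : b.Nodup) :
    PySem.Set.update ([] : PySem.Set String) b = b := by
  have : PySem.Set.update ([] : PySem.Set String) b = PySem.Set.ofList b := rfl
  rw [this]; exact PySem.Set.ofList_eq_self_of_nodup b h

theorem pv_specB_append (xs ys : List String) :
    pvSpecB (xs ++ ys) = PySem.Set.union (pvSpecB xs) (pvSpecB ys) := by
  induction xs with
  | nil =>
    show pvSpecB ys = PySem.Set.update ([] : PySem.Set String) (pvSpecB ys)
    rw [pv_update_nil_left _ (pv_specB_nodup ys)]
  | cons f rest ih =>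
    show PySem.Set.union (pvFeatOf f) (pvSpecB (rest ++ ys))
        = PySem.Set.union (PySem.Set.union (pvFeatOf f) (pvSpecB rest)) (pvSpecB ys)
    rw [ih]
    exact pv_update_assoc _ _ _

theorem pv_alt_eq_specB (l : List String) : detect_raster_features_py_alt l = pvSpecB l := by
  rw [detect_raster_features_py_alt]
  by_cases h0 : l.length = 0
  · rw [dif_pos h0]
    cases l with
    | nil => rfl
    | cons a t => simp at h0
  · rw [dif_neg h0]
    by_cases h1 : l.length = 1
    · rw [dif_pos h1]
      cases l with
      | nil => simp at h1
      | cons a t =>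
        cases t with
        | nil =>
          show pvFeatOf a = PySem.Set.union (pvFeatOf a) (pvSpecB [])
          rfl
        | cons b t' => simp at h1
    · rw [dif_neg h1]
      show PySem.Set.union
          (detect_raster_features_py_alt (PySem.List.slice l none (some ((l.length / 2 : Nat) : Int))))
          (detect_raster_features_py_alt (PySem.List.slice l (some ((l.length / 2 : Nat) : Int)) none))
        = pvSpecB l
      rw [pv_alt_eq_specB, pv_alt_eq_specB,
        PySem.List.slice_to_natCast, PySem.List.slice_from_natCast,
        ← pv_specB_append, List.take_append_drop]
termination_by l.length
decreasing_by
  · rw [PySem.List.slice_to_natCast]; rw [List.length_take]; omega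
  · rw [PySem.List.slice_from_natCast]; rw [List.length_drop]; omega

theorem pv_foldl_update (l : List String) (acc : PySem.Set String) :
    l.foldl pvStepA acc = PySem.Set.update acc (pvSpecB l) := by
  induction l generalizing acc with
  | nil => rfl
  | cons f rest ih =>
    show (rest.foldl pvStepA (pvStepA acc f)) = _
    rw [ih, pv_step_update]
    show _ = PySem.Set.update acc (PySem.Set.update (pvFeatOf f) (pvSpecB rest))
    rw [pv_update_assoc]

-- ===== VERDICT =====
theorem detect_raster_features_py_spec : Claim_equal_detect_raster_features_py := by
  intro fragments _
  show detect_raster_features_py fragments = detect_raster_features_py_alt fragments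
  rw [pv_alt_eq_specB]
  show fragments.foldl pvStepA [] = pvSpecB fragments
  rw [pv_foldl_update]
  exact pv_update_nil_left _ (pv_specB_nodup fragments)
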